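-- pv_equiv track=rewrite | github.com/kalin5850/coding_practice | codesignal/interview_practice/arrays/4_sudoku2.py | get_subs
-- ===== SOURCE A (Python) =====
-- def get_subs(grid):
--     subs = []
--     for i in range(0, len(grid), 3):
--         for j in range(0, len(grid), 3):
--             tmp = []
--             for k in range(i, i + 3):
--                 for l in range(j, j + 3):
--                     tmp.append(grid[k][l])
--             subs.append(tmp)
--     return subs
-- ===== SOURCE B (Python) =====
-- def get_subs(grid):
--     n = len(grid)
--     nb = n // 3
--     subs = [[] for _ in range(nb * nb)]
--     for k in range(n):
--         for l in range(n):
--             subs[(k // 3) * nb + (l // 3)].append(grid[k][l])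
--     return subs
-- ===== Notes on version B (the rewrite author's own statement) =====
-- stated objective: alternative
-- what changed: Replaces A's four nested block-walking loops (gather each 3x3 subgrid separately) with a single flat row-major double loop that scatters each cell into its precomputed subgrid bucket subs[(k//3)*nb + (l//3)].
import Mathlib
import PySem

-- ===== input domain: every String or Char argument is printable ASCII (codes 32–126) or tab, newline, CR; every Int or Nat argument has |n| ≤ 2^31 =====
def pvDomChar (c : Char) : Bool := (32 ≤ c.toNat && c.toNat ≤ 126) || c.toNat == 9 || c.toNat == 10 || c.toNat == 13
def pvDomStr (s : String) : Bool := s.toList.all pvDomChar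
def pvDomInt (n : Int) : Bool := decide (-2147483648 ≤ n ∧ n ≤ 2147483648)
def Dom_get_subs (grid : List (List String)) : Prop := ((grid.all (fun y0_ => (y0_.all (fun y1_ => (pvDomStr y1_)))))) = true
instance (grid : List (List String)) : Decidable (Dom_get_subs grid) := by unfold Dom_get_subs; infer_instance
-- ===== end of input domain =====

-- B replaces A's four nested block-walking loops by one flat row-major pass that
-- scatters each cell into its precomputed 3x3-subgrid bucket; return values agree on
-- every grid whose side is a multiple of 3 with rows at least that long.

-- ===== PORT A =====
-- literal port of A: walk blocks with stepped ranges, gather each 3x3 block into tmp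
def get_subs (grid : List (List String)) : List (List String) :=
  (PySem.List.pyRange 0 (grid.length : Int) 3).foldl (fun subs i =>
    (PySem.List.pyRange 0 (grid.length : Int) 3).foldl (fun subs j =>
      subs ++ [ (PySem.List.pyRange i (i + 3) 1).foldl (fun tmp k =>
                  (PySem.List.pyRange j (j + 3) 1).foldl (fun tmp l =>
                    tmp ++ [PySem.List.pyGetD (PySem.List.pyGetD grid k []) l ""]) tmp) [] ]) subs) []

-- ===== PORT B =====
-- literal port of B: allocate nb*nb empty buckets, one flat k,l pass, append each
-- cell to bucket (k//3)*nb + l//3 (Python's subs[idx].append(x) = set idx (get idx ++ [x]))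
def get_subs_alt (grid : List (List String)) : List (List String) :=
  let n : Int := (grid.length : Int)
  let nb : Int := PySem.Int.floordiv n 3
  let subs0 : List (List String) := (PySem.List.pyRange 0 (nb * nb) 1).map (fun _ => [])
  (PySem.List.pyRange 0 n 1).foldl (fun subs k =>
    (PySem.List.pyRange 0 n 1).foldl (fun subs l =>
      let idx := PySem.Int.floordiv k 3 * nb + PySem.Int.floordiv l 3
      PySem.List.pySetD subs idx
        (PySem.List.pyGetD subs idx [] ++ [PySem.List.pyGetD (PySem.List.pyGetD grid k []) l ""])) subs) subs0

-- ===== PRECONDITION & SPEC =====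
-- Pre_ excludes exactly the grids on which the Python A raises IndexError:
-- a side length not a multiple of 3, or some row shorter than the side length.
def Pre_get_subs (grid : List (List String)) : Prop :=
  grid.length % 3 = 0 ∧ ∀ row ∈ grid, grid.length ≤ row.length
instance (grid : List (List String)) : Decidable (Pre_get_subs grid) := by unfold Pre_get_subs; infer_instance

def pvWitness_get_subs : List (List String) :=
  [["1","2","3"],["4","5","6"],["7","8","9"]]

def Spec_get_subs (grid : List (List String)) (out : List (List String)) : Prop := out = get_subs_alt grid
instance (grid : List (List String)) (out : List (List String)) : Decidable (Spec_get_subs grid out) := by unfold Spec_get_subs; infer_instance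

-- ===== CLAIM (what is proved, stated in full; the proofs are below) =====
def Claim_equal_get_subs : Prop := ∀ (grid : List (List String)), Dom_get_subs grid → Pre_get_subs grid → Spec_get_subs grid (get_subs grid)

-- ===== LEMMAS AND PROOFS =====

-- the cell grid[k][l], the bucket index of a cell, and the row-major cell list
def cellf (grid : List (List String)) (p : Nat × Nat) : String := (grid.getD p.1 []).getD p.2 ""
def idxf (nb : Nat) (p : Nat × Nat) : Nat := p.1 / 3 * nb + p.2 / 3
def pairsf (n : Nat) : List (Nat × Nat) := (List.range n).flatMap (fun k => (List.range n).map (fun l => (k, l)))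
def bucketf (grid : List (List String)) (nb t : Nat) : List String :=
  ((pairsf (3 * nb)).filter (fun p => idxf nb p = t)).map (cellf grid)

theorem divmod_self (m b nb : Nat) (hb : b < nb) : (m * nb + b) / nb = m ∧ (m * nb + b) % nb = b := by
  have h : 0 < nb := by omega
  constructor
  · rw [Nat.mul_comm, Nat.mul_add_div h, Nat.div_eq_of_lt hb]; omega
  · rw [Nat.mul_comm, Nat.mul_add_mod, Nat.mod_eq_of_lt hb]

theorem unique_div (a b a0 b0 nb : Nat) (hb : b < nb) (hb0 : b0 < nb) :
    a * nb + b = a0 * nb + b0 ↔ a = a0 ∧ b = b0 := by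
  constructor
  · intro h
    have h1 := (divmod_self a b nb hb).1
    have h2 := (divmod_self a0 b0 nb hb0).1
    rw [h] at h1
    have ha : a = a0 := h1.symm.trans h2
    exact ⟨ha, by subst ha; omega⟩
  · rintro ⟨rfl, rfl⟩; rfl

-- row-major enumeration of a product of ranges as one flat range
theorem prod_range {α : Type} (f : Nat → Nat → α) (nb : Nat) : ∀ (m : Nat),
    (List.range m).flatMap (fun a => (List.range nb).map (fun b => f a b)) =
    (List.range (m * nb)).map (fun t => f (t / nb) (t % nb)) := by
  intro m
  induction m with
  | zero => simp
  | succ m ih =>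
    rw [List.range_succ, List.flatMap_append, ih, Nat.succ_mul, List.range_add, List.map_append]
    congr 1
    simp only [List.flatMap_cons, List.flatMap_nil, List.append_nil, List.map_map]
    apply List.map_congr_left
    intro b hb
    rw [List.mem_range] at hb
    obtain ⟨h1, h2⟩ := divmod_self m b nb hb
    simp [h1, h2]

theorem range_mul3 (m : Nat) :
    List.range (3 * m) = (List.range m).flatMap (fun b => (List.range 3).map (fun c => 3 * b + c)) := by
  rw [prod_range (fun b c => 3 * b + c) 3 m]
  have h : ∀ t : Nat, 3 * (t / 3) + t % 3 = t := by omega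
  rw [Nat.mul_comm]
  simp only [h, List.map_id']

theorem flatMap_if {α : Type} (X : Nat → List α) (a0 : Nat) : ∀ (m : Nat), a0 < m →
    (List.range m).flatMap (fun a => if a = a0 then X a else []) = X a0 := by
  intro m
  induction m with
  | zero => omega
  | succ m ih =>
    intro h
    rw [List.range_succ, List.flatMap_append]
    by_cases hm : a0 = m
    · subst hm
      have hnil : (List.range a0).flatMap (fun a => if a = a0 then X a else []) = [] := by
        apply List.flatMap_eq_nil_iff.mpr
        intro a ha
        rw [List.mem_range] at ha
        simp [Nat.ne_of_lt ha]
      simp [hnil]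
    · rw [ih (by omega)]
      simp only [List.flatMap_cons, List.flatMap_nil, List.append_nil]
      rw [if_neg (fun e => hm e.symm)]
      simp

theorem flatMap_congr_mem {α β : Type} (l : List α) (f g : α → List β) (h : ∀ x ∈ l, f x = g x) :
    l.flatMap f = l.flatMap g := by
  simp only [List.flatMap]
  rw [List.map_congr_left h]

theorem pyRange3 (nb : Nat) :
    PySem.List.pyRange 0 (3 * (nb : Int)) 3 = (List.range nb).map (fun b => ((3 * b : Nat) : Int)) := by
  rw [PySem.List.pyRange_of_pos 0 (3 * (nb : Int)) (by norm_num)]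
  rcases Nat.eq_zero_or_pos nb with h | h
  · subst h; simp
  · rw [if_pos (by positivity)]
    have he : ((3 * (nb : Int) - 0 + 3 - 1) / 3).toNat = nb := by omega
    rw [he]
    apply List.map_congr_left
    intro b _
    push_cast
    ring

theorem pyRange_one_three (i : Int) :
    PySem.List.pyRange i (i + 3) 1 = (List.range 3).map (fun r : Nat => i + (r : Int)) := by
  have h3 : (i + 3 - i).toNat = 3 := by omega
  rw [PySem.List.pyRange_one, h3]

-- A's closed form: block-by-block gather
theorem A_closed (grid : List (List String)) (nb : Nat) (h : grid.length = 3 * nb) :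
    get_subs grid = (List.range nb).flatMap (fun bi => (List.range nb).map (fun bj =>
      (List.range 3).flatMap (fun r => (List.range 3).map (fun c =>
        cellf grid (3 * bi + r, 3 * bj + c))))) := by
  unfold get_subs
  rw [h]
  push_cast
  rw [pyRange3]
  simp only [List.foldl_map, pyRange_one_three, List.foldl_map,
    PySem.List.foldl_append_singleton_eq_map, PySem.List.foldl_append_eq_flatMap,
    List.nil_append]
  have hcast : ∀ (x r : Nat), ((3 * x : Nat) : Int) + (r : Int) = ((3 * x + r : Nat) : Int) := by
    intros; push_cast; ring
  simp only [hcast, PySem.List.pyGetD_natCast]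
  rfl

theorem getD_set (xs : List (List String)) (i t : Nat) (v : List String) :
    (xs.set i v).getD t [] = if i = t ∧ i < xs.length then v else xs.getD t [] := by
  rw [List.getD_eq_getElem?_getD, List.getD_eq_getElem?_getD, List.getElem?_set]
  split_ifs with h1 h2 h3 h4 <;> simp_all
  omega

-- B's scatter loop: each bucket collects, in order, the cells whose index maps to it
theorem scatter (grid : List (List String)) (nb : Nat) : ∀ (ps : List (Nat × Nat)) (subs : List (List String)),
    (∀ p ∈ ps, idxf nb p < subs.length) →
    (ps.foldl (fun s p => s.set (idxf nb p) (s.getD (idxf nb p) [] ++ [cellf grid p])) subs).length = subs.length ∧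
    ∀ t, (ps.foldl (fun s p => s.set (idxf nb p) (s.getD (idxf nb p) [] ++ [cellf grid p])) subs).getD t [] =
      subs.getD t [] ++ (ps.filter (fun p => idxf nb p = t)).map (cellf grid) := by
  intro ps
  induction ps with
  | nil => intro subs _; simp
  | cons p ps ih =>
    intro subs hlt
    have hp : idxf nb p < subs.length := hlt p (by simp)
    simp only [List.foldl_cons]
    set subs' := subs.set (idxf nb p) (subs.getD (idxf nb p) [] ++ [cellf grid p]) with hs'
    have hlen' : subs'.length = subs.length := by simp [hs']
    obtain ⟨ihl, ihd⟩ := ih subs' (by intro q hq; rw [hlen']; exact hlt q (by simp [hq]))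
    refine ⟨by rw [ihl, hlen'], ?_⟩
    intro t
    rw [ihd t, hs', getD_set]
    by_cases he : idxf nb p = t
    · subst he
      simp [hp]
    · simp [he]

-- column filter: within one row k, the columns landing in bucket t
theorem col_filter (nb t k : Nat) (ht : t < nb * nb) :
    (List.range (3 * nb)).filter (fun l => decide (k / 3 * nb + l / 3 = t)) =
    if k / 3 = t / nb then [3 * (t % nb), 3 * (t % nb) + 1, 3 * (t % nb) + 2] else [] := by
  have hnb : 0 < nb := by
    rcases Nat.eq_zero_or_pos nb with h | h
    · subst h; simp at ht
    · exact h
  have hb0 : t % nb < nb := Nat.mod_lt _ hnb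
  have htd : t / nb * nb + t % nb = t := by rw [Nat.mul_comm]; exact Nat.div_add_mod t nb
  rw [range_mul3, List.filter_flatMap]
  have hcol : ∀ b < nb, ((List.range 3).map (fun c => 3 * b + c)).filter
      (fun l => decide (k / 3 * nb + l / 3 = t)) =
      if b = t % nb ∧ k / 3 = t / nb then [3 * b, 3 * b + 1, 3 * b + 2] else [] := by
    intro b hbnb
    rw [List.filter_map]
    have hd : ∀ c < 3, (3 * b + c) / 3 = b := by intro c hc; omega
    have hshow : List.range 3 = [0, 1, 2] := by decide
    rw [hshow]
    by_cases hc : k / 3 * nb + b = t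
    · have hkb : k / 3 = t / nb ∧ b = t % nb := by
        rw [← htd] at hc
        exact (unique_div (k / 3) b (t / nb) (t % nb) nb hbnb hb0).mp hc
      obtain ⟨h1, h2⟩ := hkb
      subst h2
      simp [Function.comp_def, hd 1 (by omega), hd 2 (by omega), h1, htd]
    · have hne : ¬(b = t % nb ∧ k / 3 = t / nb) := by
        rintro ⟨rfl, h2⟩; exact hc (by rw [h2, htd])
      rw [if_neg hne]
      simp [Function.comp_def, hd 1 (by omega), hd 2 (by omega), hc]
  by_cases hk : k / 3 = t / nb
  · have hsimp : ∀ b, (if b = t % nb ∧ k / 3 = t / nb then [3 * b, 3 * b + 1, 3 * b + 2] else ([] : List Nat)) =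
        (if b = t % nb then [3 * b, 3 * b + 1, 3 * b + 2] else []) := by
      intro b; by_cases hb : b = t % nb <;> simp [hb, hk]
    calc (List.range nb).flatMap (fun b => ((List.range 3).map (fun c => 3 * b + c)).filter
            (fun l => decide (k / 3 * nb + l / 3 = t)))
        = (List.range nb).flatMap (fun b => if b = t % nb then [3 * b, 3 * b + 1, 3 * b + 2] else []) := by
          apply flatMap_congr_mem
          intro b hb
          rw [List.mem_range] at hb
          rw [hcol b hb, hsimp b]
      _ = [3 * (t % nb), 3 * (t % nb) + 1, 3 * (t % nb) + 2] := flatMap_if _ _ nb hb0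
      _ = _ := by rw [if_pos hk]
  · rw [if_neg hk]
    rw [flatMap_congr_mem _ _ (fun _ => ([] : List Nat)) ?_]
    · simp
    · intro b hb
      rw [List.mem_range] at hb
      rw [hcol b hb, if_neg]
      rintro ⟨_, h2⟩; exact hk h2

-- the key combinatorial fact: the row-major cells of bucket t are exactly block (t/nb, t%nb)
theorem filter_pairs (nb t : Nat) (ht : t < nb * nb) :
    (pairsf (3 * nb)).filter (fun p => idxf nb p = t) =
    (List.range 3).flatMap (fun r => (List.range 3).map (fun c =>
      (3 * (t / nb) + r, 3 * (t % nb) + c))) := by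
  have hnb : 0 < nb := by
    rcases Nat.eq_zero_or_pos nb with h | h
    · subst h; simp at ht
    · exact h
  have ha0 : t / nb < nb := Nat.div_lt_iff_lt_mul hnb |>.mpr (by omega)
  rw [pairsf, List.filter_flatMap]
  have hrow : ∀ k, ((List.range (3 * nb)).map (fun l => (k, l))).filter (fun p => idxf nb p = t) =
      (if k / 3 = t / nb then [3 * (t % nb), 3 * (t % nb) + 1, 3 * (t % nb) + 2] else []).map (fun l => (k, l)) := by
    intro k
    rw [List.filter_map, ← col_filter nb t k ht]
    congr 1
  simp only [hrow]
  rw [range_mul3 nb, List.flatMap_assoc]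
  have hstep : ∀ a, ((List.range 3).map (fun c => 3 * a + c)).flatMap (fun k =>
      (if k / 3 = t / nb then [3 * (t % nb), 3 * (t % nb) + 1, 3 * (t % nb) + 2] else []).map (fun l => (k, l))) =
      if a = t / nb then (List.range 3).flatMap (fun r =>
        [(3 * a + r, 3 * (t % nb)), (3 * a + r, 3 * (t % nb) + 1), (3 * a + r, 3 * (t % nb) + 2)]) else [] := by
    intro a
    have hd : ∀ c < 3, (3 * a + c) / 3 = a := by intro c hc; omega
    have hshow : List.range 3 = [0, 1, 2] := by decide
    by_cases ha : a = t / nb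
    · subst ha
      have f : ∀ c, c < 3 → (if (3 * (t / nb) + c) / 3 = t / nb then [3 * (t % nb), 3 * (t % nb) + 1, 3 * (t % nb) + 2] else ([] : List Nat)) = [3 * (t % nb), 3 * (t % nb) + 1, 3 * (t % nb) + 2] := by
        intro c hc; rw [hd c hc, if_pos rfl]
      simp only [hshow, List.map_cons, List.map_nil, List.flatMap_cons, List.flatMap_nil,
        List.append_nil, f 0 (by omega), f 1 (by omega), f 2 (by omega)]
      simp
    · have f : ∀ c, c < 3 → (if (3 * a + c) / 3 = t / nb then [3 * (t % nb), 3 * (t % nb) + 1, 3 * (t % nb) + 2] else ([] : List Nat)) = [] := by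
        intro c hc; rw [hd c hc, if_neg ha]
      simp only [hshow, List.map_cons, List.map_nil, List.flatMap_cons, List.flatMap_nil,
        List.append_nil, f 0 (by omega), f 1 (by omega), f 2 (by omega)]
      simp [ha]
  rw [flatMap_congr_mem _ _ _ (fun a _ => hstep a), flatMap_if _ _ nb ha0]
  have hshow : List.range 3 = [0, 1, 2] := by decide
  simp [hshow]

-- B's closed form: map of buckets
theorem B_closed (grid : List (List String)) (nb : Nat) (h : grid.length = 3 * nb) :
    get_subs_alt grid = (List.range (nb * nb)).map (bucketf grid nb) := by
  unfold get_subs_alt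
  rw [h]
  have hdiv : ∀ k : Nat, PySem.Int.floordiv ((k : Nat) : Int) 3 = ((k / 3 : Nat) : Int) := by
    intro k; exact_mod_cast PySem.Int.floordiv_natCast k 3
  have hnb : PySem.Int.floordiv ((3 * nb : Nat) : Int) 3 = ((nb : Nat) : Int) := by
    rw [hdiv]; congr 1; omega
  simp only [hnb]
  have hmul : ((nb : Nat) : Int) * ((nb : Nat) : Int) = ((nb * nb : Nat) : Int) := by push_cast; ring
  rw [hmul, PySem.List.pyRange_zero_natCast, PySem.List.pyRange_zero_natCast, List.map_map]
  simp only [Function.comp_def, List.foldl_map, hdiv]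
  have hfold : ∀ (subs : List (List String)),
      (List.range (3 * nb)).foldl (fun subs k =>
        (List.range (3 * nb)).foldl (fun subs l =>
          PySem.List.pySetD subs (((k / 3 : Nat) : Int) * ((nb : Nat) : Int) + ((l / 3 : Nat) : Int))
            (PySem.List.pyGetD subs (((k / 3 : Nat) : Int) * ((nb : Nat) : Int) + ((l / 3 : Nat) : Int)) [] ++
              [PySem.List.pyGetD (PySem.List.pyGetD grid ((k : Nat) : Int) []) ((l : Nat) : Int) ""])) subs) subs =
      (pairsf (3 * nb)).foldl (fun s p => s.set (idxf nb p) (s.getD (idxf nb p) [] ++ [cellf grid p])) subs := by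
    intro subs
    rw [pairsf, List.foldl_flatMap]
    have hc : ∀ k l : Nat, ((k / 3 : Nat) : Int) * ((nb : Nat) : Int) + ((l / 3 : Nat) : Int) =
        ((k / 3 * nb + l / 3 : Nat) : Int) := by intros; push_cast; ring
    simp only [List.foldl_map, hc, PySem.List.pySetD_natCast, PySem.List.pyGetD_natCast]
    rfl
  rw [hfold]
  have hb : ∀ p ∈ pairsf (3 * nb), idxf nb p <
      ((List.range (nb * nb)).map (fun _ => ([] : List String))).length := by
    intro p hp
    rw [List.length_map, List.length_range]
    have hmem : p.1 < 3 * nb ∧ p.2 < 3 * nb := by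
      simp only [pairsf, List.mem_flatMap, List.mem_map, List.mem_range] at hp
      obtain ⟨k, hk, l, hl, rfl⟩ := hp
      exact ⟨hk, hl⟩
    have h1 : p.1 / 3 < nb := by omega
    have h2 : p.2 / 3 < nb := by omega
    calc idxf nb p < p.1 / 3 * nb + nb := by unfold idxf; omega
      _ = (p.1 / 3 + 1) * nb := by ring
      _ ≤ nb * nb := by
          have := Nat.mul_le_mul_right nb (Nat.succ_le_of_lt h1)
          omega
  obtain ⟨hl, hd⟩ := scatter grid nb (pairsf (3 * nb)) _ hb
  have hlen0 : ((List.range (nb * nb)).map (fun _ => ([] : List String))).length = nb * nb := by simp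
  apply List.ext_getElem
  · rw [hl, hlen0]; simp
  · intro t ht1 ht2
    have h0 : ((List.range (nb * nb)).map (fun _ => ([] : List String))).getD t [] = [] := by
      rw [List.getD_eq_getElem _ _ (by rw [hlen0]; rw [hl, hlen0] at ht1; exact ht1)]
      simp
    have hdt := hd t
    rw [h0, List.nil_append] at hdt
    rw [← List.getD_eq_getElem _ ([] : List String) ht1, hdt]
    simp [bucketf]

-- ===== VERDICT (by name: the statement is the Claim_ definition above) =====
theorem get_subs_spec : Claim_equal_get_subs := by
  intro grid _ hpre
  obtain ⟨h3, _⟩ := hpre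
  obtain ⟨nb, hnb⟩ : ∃ nb, grid.length = 3 * nb := ⟨grid.length / 3, by omega⟩
  show get_subs grid = get_subs_alt grid
  rw [A_closed grid nb hnb, B_closed grid nb hnb,
    prod_range (fun bi bj => (List.range 3).flatMap (fun r => (List.range 3).map (fun c =>
        cellf grid (3 * bi + r, 3 * bj + c)))) nb nb]
  apply List.map_congr_left
  intro t ht
  rw [List.mem_range] at ht
  rw [bucketf, filter_pairs nb t ht, List.map_flatMap]
  simp [List.map_map, Function.comp_def]
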